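-- pv_equiv track=rewrite | github.com/cgdilley/AdventOfCode2018 | day25_0/day25_0.py | form_constellations
-- ===== SOURCE A (Python) =====
-- def form_constellations(coords: list, dist: int) -> dict:
--     """
--     Identifies the constellations that each coordinate belongs to, returning a dictionary
--     that maps all the given coordinate positions to lists of coordinates that belong to the
--     constellation that that coordinate is in.
--
--     :param coords: The list of spacetime coordinates
--     :param dist: The maximum manhattan distance to consider for constellation formation
--     :return: A dictionary mapping all coordinates to a list of their constellation coordinates
--     """
--     constellations = dict()
--
--     # Iterate through all coordinates
--     for pos, coord in enumerate(coords):
--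
--         # If this coordinate was encountered before, start by using its existing constellation info.  Otherwise,
--         # start with a set of just itself.
--         nearby = {coord} if coord not in constellations else constellations[coord]
--
--         # Iterate through all other coordinates (that haven't been already encountered by this containing loop)
--         others = coords[pos+1:]
--         for other in others:
--
--             # If this other coordinate is already in the nearby list for this, don't waste time calculating
--             if other in nearby:
--                 continue
--
--             # Calculate the manhattan distance between the two coordinates
--             man = manhattan(coord, other)
--
--             # If the other coordinate is within range, add it and any other coordinates it already shares a
--             # constellation with to the list of nearby coordinates
--             if man <= dist:
--                 if other in constellations:
--                     nearby = nearby.union(constellations[other])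
--                 else:
--                     nearby.add(other)
--
--         # After having collected a set of all nearby coordinates (and the constellations that those coordinates are
--         # already in), update the constellations list to ensure that all of the coordinates know that they belong
--         # in the same constellation together
--         for n in nearby:
--             constellations[n] = nearby
--
--     return constellations
--
-- def manhattan(coord1: tuple, coord2: tuple) -> int:
--     """
--     Hey, I've generalized the manhattan distance calculation for any number of dimensions.
--     :param coord1:
--     :param coord2:
--     :return:
--     """
--     return sum(abs(dim1 - dim2) for dim1, dim2 in zip(coord1, coord2))
-- ===== SOURCE B (Python) =====
-- def form_constellations(coords: list, dist: int) -> dict: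
--     """Label each coordinate with an integer component id (relabelling one side's
--     id on every merge) over a single scan of the later pairs, then build the
--     result dictionary once at the end from the finished labelling."""
--     label = {}
--     for i, c in enumerate(coords):
--         if c not in label:
--             label[c] = i
--         for other in coords[i + 1:]:
--             if manhattan(c, other) <= dist:
--                 if other not in label:
--                     label[other] = label[c]
--                 elif label[other] != label[c]:
--                     old, new = label[other], label[c]
--                     for k in label:
--                         if label[k] == old:
--                             label[k] = new
--     return {c: {x for x in coords if label[x] == label[c]} for c in label}
--
--
-- def manhattan(coord1: tuple, coord2: tuple) -> int:
--     return sum(abs(dim1 - dim2) for dim1, dim2 in zip(coord1, coord2))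
-- ===== Notes on version B (the rewrite author's own statement) =====
-- stated objective: alternative
-- what changed: Replaces A's dict of incrementally merged and aliased set objects by an integer component labelling (relabel one side's id on each merge) over the same later-pair scan, building the result dictionary once at the end instead of rewriting shared sets into the dict at every position.
import Mathlib
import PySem

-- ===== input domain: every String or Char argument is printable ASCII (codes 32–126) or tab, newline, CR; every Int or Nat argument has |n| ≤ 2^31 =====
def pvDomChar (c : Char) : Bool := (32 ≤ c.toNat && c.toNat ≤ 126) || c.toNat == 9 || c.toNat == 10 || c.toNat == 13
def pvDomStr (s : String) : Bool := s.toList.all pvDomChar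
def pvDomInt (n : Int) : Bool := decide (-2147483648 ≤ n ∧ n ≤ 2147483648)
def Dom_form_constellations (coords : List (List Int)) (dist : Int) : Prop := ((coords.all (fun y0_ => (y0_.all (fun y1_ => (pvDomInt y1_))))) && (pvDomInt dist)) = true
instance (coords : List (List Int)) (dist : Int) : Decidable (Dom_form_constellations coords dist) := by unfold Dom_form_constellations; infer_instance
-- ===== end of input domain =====

-- B replaces A's dict of incrementally merged (and aliased) set objects by an integer
-- component labelling (relabel one side's id on each merge), building the result dictionary
-- once at the end; same asymptotic cost, different structure ("alternative").
-- Python's set/dict iteration orders are not observable in the compared output (the dict is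
-- compared ignoring order and its values as sets); both ports fix one canonical order,
-- on which the two programs provably agree exactly.

-- ===== PORT A =====
def pvManhattan (c1 c2 : List Int) : Int :=
  ((c1.zip c2).map (fun p => |p.1 - p.2|)).sum

-- Python's `set` is unordered; this port represents every set canonically as the sublist
-- of `uniq` (the distinct coordinates in first-occurrence order) consisting of its members.
def pvCanonSingleton (uniq : List (List Int)) (x : List Int) : List (List Int) :=
  uniq.filter (fun y => y == x)

def pvCanonAdd (uniq s : List (List Int)) (x : List Int) : List (List Int) :=
  uniq.filter (fun y => s.contains y || y == x)

def pvCanonUnion (uniq s t : List (List Int)) : List (List Int) :=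
  uniq.filter (fun y => s.contains y || t.contains y)

def pvAStep (coords : List (List Int)) (dist : Int) (uniq : List (List Int))
    (constellations : PySem.Dict (List Int) (List (List Int))) (pc : Int × List Int) :
    PySem.Dict (List Int) (List (List Int)) :=
  let pos := pc.1
  let coord := pc.2
  -- nearby = {coord} if coord not in constellations else constellations[coord]
  let nearby0 := if !constellations.contains coord then pvCanonSingleton uniq coord
    else constellations.getD coord []
  -- others = coords[pos+1:]
  let others := PySem.List.slice coords (some (pos + 1)) none
  let nearby := others.foldl (fun nb other =>
    if nb.contains other then nb
    else if pvManhattan coord other ≤ dist then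
      if constellations.contains other then
        pvCanonUnion uniq nb (constellations.getD other [])
      else pvCanonAdd uniq nb other
    else nb) nearby0
  -- for n in nearby: constellations[n] = nearby
  nearby.foldl (fun d n => d.insert n nearby) constellations

def form_constellations (coords : List (List Int)) (dist : Int) : List (List Int × List (List Int)) :=
  ((PySem.List.enumerate coords).foldl (pvAStep coords dist (PySem.Set.ofList coords))
    PySem.Dict.empty).items

-- ===== PORT B =====
def pvManhattanAlt (c1 c2 : List Int) : Int :=
  ((c1.zip c2).map (fun p => |p.1 - p.2|)).sum

-- old, new = label[other], label[c]; for k in label: if label[k] == old: label[k] = new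
-- (in-place value updates keep key order)
def pvRelabel (lbl : PySem.Dict (List Int) Int) (lo lc : Int) : PySem.Dict (List Int) Int :=
  ⟨lbl.items.map (fun p => (p.1, if p.2 == lo then lc else p.2))⟩

def pvBStep (coords : List (List Int)) (dist : Int) (lbl : PySem.Dict (List Int) Int)
    (pc : Int × List Int) : PySem.Dict (List Int) Int :=
  let i := pc.1
  let c := pc.2
  -- if c not in label: label[c] = i
  let lbl0 := if lbl.contains c then lbl else lbl.insert c i
  -- for other in coords[i+1:]: ...
  (PySem.List.slice coords (some (i + 1)) none).foldl (fun lbl other =>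
    if pvManhattanAlt c other ≤ dist then
      if !lbl.contains other then lbl.insert other (lbl.getD c 0)
      else if lbl.getD other 0 != lbl.getD c 0 then
        pvRelabel lbl (lbl.getD other 0) (lbl.getD c 0)
      else lbl
    else lbl) lbl0

def form_constellations_alt (coords : List (List Int)) (dist : Int) :
    List (List Int × List (List Int)) :=
  let lbl := (PySem.List.enumerate coords).foldl (pvBStep coords dist) PySem.Dict.empty
  -- {c: {x for x in coords if label[x] == label[c]} for c in label}
  lbl.keys.map (fun c => (c, PySem.Set.ofList
    (coords.filter (fun x => lbl.getD x 0 == lbl.getD c 0))))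

-- ===== PRECONDITION & SPEC =====
def Spec_form_constellations (coords : List (List Int)) (dist : Int) (out : List (List Int × List (List Int))) : Prop := out = form_constellations_alt coords dist
instance (coords : List (List Int)) (dist : Int) (out : List (List Int × List (List Int))) : Decidable (Spec_form_constellations coords dist out) := by unfold Spec_form_constellations; infer_instance

-- ===== CLAIM (what is proved, stated in full; the proofs are below) =====
def Claim_equal_form_constellations : Prop := ∀ (coords : List (List Int)) (dist : Int), Dom_form_constellations coords dist → Spec_form_constellations coords dist (form_constellations coords dist)

-- ===== LEMMAS AND PROOFS =====

-- the class (component) of x : the distinct coordinates carrying x's label, in first-occurrence order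
def pvClassOf (U : List (List Int)) (L : PySem.Dict (List Int) Int) (x : List Int) :
    List (List Int) :=
  U.filter (fun y => L.get? y == L.get? x)

theorem mem_pvClassOf {U : List (List Int)} {L : PySem.Dict (List Int) Int} {x y : List Int} :
    y ∈ pvClassOf U L x ↔ y ∈ U ∧ L.get? y = L.get? x := by
  simp [pvClassOf]

-- coupling invariant between A's dict D and B's label dict L after processing the prefix `pre`
def pvInv (cs : List (List Int)) (D : PySem.Dict (List Int) (List (List Int)))
    (L : PySem.Dict (List Int) Int) (pre : List (List Int)) : Prop :=
  D.items = L.keys.map (fun x => (x, pvClassOf (PySem.Set.ofList cs) L x)) ∧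
  (∀ v ∈ L.values, v < (pre.length : Int)) ∧
  L.keys.Nodup ∧
  (∀ x ∈ L.keys, x ∈ cs) ∧
  (∀ x ∈ pre, x ∈ L.keys)

theorem pvRelabel_get? (L : PySem.Dict (List Int) Int) (lo lc : Int) (x : List Int) :
    (pvRelabel L lo lc).get? x = (L.get? x).map (fun v => if v == lo then lc else v) := by
  obtain ⟨l⟩ := L
  induction l with
  | nil => rfl
  | cons p t ih =>
    simp only [pvRelabel, PySem.Dict.get?, PySem.Dict.items, List.map_cons, List.find?_cons] at *
    by_cases h : (p.1 == x) = true <;> simp [h] at ih ⊢ <;> simpa using ih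

theorem pvRelabel_contains (L : PySem.Dict (List Int) Int) (lo lc : Int) (x : List Int) :
    (pvRelabel L lo lc).contains x = L.contains x := by
  simp [pvRelabel, PySem.Dict.contains, List.any_map]
  rfl

theorem pvRelabel_keys (L : PySem.Dict (List Int) Int) (lo lc : Int) :
    (pvRelabel L lo lc).keys = L.keys := by
  simp [pvRelabel, PySem.Dict.keys, List.map_map, Function.comp]

theorem pvRelabel_values (L : PySem.Dict (List Int) Int) (lo lc : Int) :
    (pvRelabel L lo lc).values = L.values.map (fun v => if v == lo then lc else v) := by
  simp [pvRelabel, PySem.Dict.values, List.map_map, Function.comp]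

theorem pv_get?_of_contains (L : PySem.Dict (List Int) Int) (k : List Int) (d0 : Int)
    (h : L.contains k = true) : L.get? k = some (L.getD k d0) := by
  rw [PySem.Dict.contains_eq_isSome_get?] at h
  rw [PySem.Dict.getD_eq_get?_getD]
  cases hg : L.get? k <;> simp [hg] at h ⊢

theorem pv_get?_mem_values {L : PySem.Dict (List Int) Int} {k : List Int} {v : Int}
    (h : L.get? k = some v) : v ∈ L.values := by
  obtain ⟨l⟩ := L
  induction l with
  | nil => simp [PySem.Dict.get?] at h
  | cons p t ih =>
    simp only [PySem.Dict.get?, PySem.Dict.items, List.find?_cons] at h ih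
    by_cases hp : (p.1 == k) = true <;> simp [hp] at h
    · simp [PySem.Dict.values, ← h]
    · have := ih (by simpa [PySem.Dict.get?] using h)
      simp [PySem.Dict.values] at this ⊢
      exact Or.inr this

theorem pv_items_foldl_insert_const (s : List (List Int)) :
    ∀ (nb : List (List Int)) (D : PySem.Dict (List Int) (List (List Int))), nb.Nodup →
    (nb.foldl (fun d n => d.insert n s) D).items
      = D.items.map (fun p => if nb.contains p.1 then (p.1, s) else p)
        ++ (nb.filter (fun n => !D.contains n)).map (fun n => (n, s)) := by
  intro nb
  induction nb with
  | nil => intro D _; simp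
  | cons x t ih =>
    intro D hnd
    have hxt : x ∉ t := (List.nodup_cons.mp hnd).1
    have hnt : t.Nodup := (List.nodup_cons.mp hnd).2
    have h2 : List.filter (fun n => !(D.insert x s).contains n) t
        = List.filter (fun n => !D.contains n) t := by
      apply List.filter_congr
      intro n hn
      rw [PySem.Dict.contains_insert]
      have : (n == x) = false := by
        simp only [beq_eq_false_iff_ne, ne_eq]
        rintro rfl; exact hxt hn
      simp [this]
    rw [List.foldl_cons, ih _ hnt]
    by_cases hx : D.contains x = true
    · rw [PySem.Dict.items_insert, if_pos hx]
      have h1 : List.map (fun p => if t.contains p.1 = true then (p.1, s) else p)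
          (List.map (fun p => if (p.1 == x) = true then (x, s) else p) D.items)
          = List.map (fun p => if (x :: t).contains p.1 = true then (p.1, s) else p) D.items := by
        rw [List.map_map]
        apply List.map_congr_left
        intro p _
        by_cases hpx : (p.1 == x) = true
        · have hpe : p.1 = x := by simpa using hpx
          simp [Function.comp, hpx, hpe, List.contains_cons]
        · have hb : (p.1 == x) = false := by simpa using hpx
          have hne : p.1 ≠ x := by simpa using hb
          simp [Function.comp, hb, List.contains_cons, hne]
      have h3 : List.filter (fun n => !D.contains n) (x :: t)
          = List.filter (fun n => !D.contains n) t := by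
        simp [List.filter_cons, hx]
      rw [h1, h2, h3]
    · rw [PySem.Dict.items_insert, if_neg hx]
      have hx' : D.contains x = false := by simpa using hx
      have hnomem : ∀ p ∈ D.items, (p.1 == x) = false := by
        intro p hp
        cases hb : (p.1 == x)
        · rfl
        · exfalso
          have : D.contains x = true := by
            simp only [PySem.Dict.contains, List.any_eq_true]
            exact ⟨p, hp, hb⟩
          rw [this] at hx'; cases hx'
      have h1 : List.map (fun p => if t.contains p.1 = true then (p.1, s) else p)
            (D.items ++ [(x, s)])
          = (List.map (fun p => if (x :: t).contains p.1 = true then (p.1, s) else p) D.items)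
            ++ [(x, s)] := by
        rw [List.map_append]
        congr 1
        · apply List.map_congr_left
          intro p hp
          have hb := hnomem p hp
          have hne : p.1 ≠ x := by simpa using hb
          simp [List.contains_cons, hne]
        · by_cases hts : t.contains x = true <;> simp [hts]
      have h3 : List.filter (fun n => !D.contains n) (x :: t)
          = x :: List.filter (fun n => !D.contains n) t := by
        simp [List.filter_cons, hx']
      rw [h1, h2, h3]
      simp

-- filtering through a discard of an element the predicate rejects changes nothing
theorem pv_filter_discard {q : List Int → Bool} {S : List (List Int)} {x : List Int}
    (hq : q x = false) : (PySem.Set.discard S x).filter q = S.filter q := by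
  show List.filter q (List.filter (fun y => !(y == x)) S) = _
  rw [List.filter_filter]
  apply List.filter_congr
  intro y _
  by_cases hyx : y = x
  · subst hyx; simp [hq]
  · simp [hyx]

-- set(filter) commutes with filter-of-set for a value predicate
theorem pv_ofList_filter (p : List Int → Bool) :
    ∀ (l : List (List Int)), PySem.Set.ofList (l.filter p) = (PySem.Set.ofList l).filter p := by
  intro l
  induction l with
  | nil => rfl
  | cons x t ih =>
    rw [List.filter_cons, PySem.Set.ofList_cons]
    by_cases hp : p x = true
    · simp only [hp, if_true]
      rw [PySem.Set.ofList_cons, ih, List.filter_cons, hp]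
      simp only [if_true]
      congr 1
      show List.filter (fun y => !(y == x)) (List.filter p _) = List.filter p (List.filter (fun y => !(y == x)) _)
      rw [List.filter_filter, List.filter_filter]
      apply List.filter_congr
      intro y _
      exact Bool.and_comm _ _
    · have hp' : p x = false := by simpa using hp
      simp only [hp', Bool.false_eq_true, if_false]
      rw [ih, List.filter_cons, hp']
      simp only [Bool.false_eq_true, if_false]
      rw [pv_filter_discard hp']

-- a leading block every element of which the predicate rejects disappears
theorem pv_ofList_append_filter (q : List Int → Bool) :
    ∀ (pre rest : List (List Int)), (∀ x ∈ pre, q x = false) →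
    (PySem.Set.ofList (pre ++ rest)).filter q = (PySem.Set.ofList rest).filter q := by
  intro pre
  induction pre with
  | nil => intro rest _; rfl
  | cons x t ih =>
    intro rest h
    rw [List.cons_append, PySem.Set.ofList_cons, List.filter_cons]
    rw [h x List.mem_cons_self]
    simp only [Bool.false_eq_true, if_false]
    rw [pv_filter_discard (h x List.mem_cons_self)]
    exact ih rest (fun y hy => h y (List.mem_cons_of_mem x hy))

-- small bridges
theorem pv_contains_filter {q : List Int → Bool} {U : List (List Int)} {y : List Int}
    (hy : y ∈ U) : (U.filter q).contains y = q y := by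
  cases hq : q y
  · have : y ∉ U.filter q := by simp [List.mem_filter, hq]
    simpa using this
  · have : y ∈ U.filter q := by simp [List.mem_filter, hq, hy]
    simpa using this

theorem pv_contains_of_get?_eq_some {L : PySem.Dict (List Int) Int} {k : List Int} {v : Int}
    (h : L.get? k = some v) : L.contains k = true := by
  rw [PySem.Dict.contains_eq_isSome_get?, h]; rfl

theorem pv_classOf_eq_of_same {U : List (List Int)} {L : PySem.Dict (List Int) Int}
    {x c : List Int} (h : L.get? x = L.get? c) : pvClassOf U L x = pvClassOf U L c := by
  simp [pvClassOf, h]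

theorem pv_keys_of_items {D : PySem.Dict (List Int) (List (List Int))}
    {ord : List (List Int)} {g : List Int → List (List Int)}
    (hD : D.items = ord.map (fun x => (x, g x))) : D.keys = ord := by
  simp [PySem.Dict.keys, hD, List.map_map, Function.comp_def]

theorem pv_get?_of_items {D : PySem.Dict (List Int) (List (List Int))}
    {ord : List (List Int)} {g : List Int → List (List Int)} {x : List Int}
    (hD : D.items = ord.map (fun x => (x, g x))) (hond : ord.Nodup) (hx : x ∈ ord) :
    D.get? x = some (g x) := by
  apply PySem.Dict.get?_of_mem_items
  · rw [hD]; exact List.mem_map.mpr ⟨x, hx, rfl⟩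
  · rw [pv_keys_of_items hD]; exact hond

theorem pv_contains_D {D : PySem.Dict (List Int) (List (List Int))}
    {ord : List (List Int)} {g : List Int → List (List Int)} {x : List Int}
    (hD : D.items = ord.map (fun x => (x, g x))) :
    D.contains x = true ↔ x ∈ ord := by
  rw [PySem.Dict.contains_iff_mem_keys, pv_keys_of_items hD]

-- the joint invariant of the two inner loops (over the same `others` list)
def pvInner (cs : List (List Int)) (L : PySem.Dict (List Int) Int) (i : Int)
    (ord : List (List Int)) (c : List Int)
    (L' : PySem.Dict (List Int) Int) (nb : List (List Int)) : Prop :=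
  L'.contains c = true ∧
  nb = pvClassOf (PySem.Set.ofList cs) L' c ∧
  (∀ x, L.contains x = true → x ∉ nb →
    pvClassOf (PySem.Set.ofList cs) L' x = pvClassOf (PySem.Set.ofList cs) L x) ∧
  (∀ x, L'.contains x = true ↔ (x ∈ ord ∨ x ∈ nb)) ∧
  (∀ v ∈ L'.values, v ≤ i) ∧
  L'.keys.Nodup

theorem pvInnerStep (cs : List (List Int)) (d : Int) (L : PySem.Dict (List Int) Int)
    (D : PySem.Dict (List Int) (List (List Int))) (ord : List (List Int)) (c : List Int)
    (i : Int)
    (hcontL : ∀ x, L.contains x = true ↔ x ∈ ord)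
    (hD : D.items = ord.map (fun x => (x, pvClassOf (PySem.Set.ofList cs) L x)))
    (hond : ord.Nodup)
    (hsub : ∀ x ∈ ord, x ∈ cs)
    (o : List Int) (ho : o ∈ cs)
    (L' : PySem.Dict (List Int) Int) (nb : List (List Int))
    (h : pvInner cs L i ord c L' nb) :
    pvInner cs L i ord c
      (if pvManhattanAlt c o ≤ d then
        if !L'.contains o then L'.insert o (L'.getD c 0)
        else if L'.getD o 0 != L'.getD c 0 then
          pvRelabel L' (L'.getD o 0) (L'.getD c 0)
        else L'
      else L')
      (if nb.contains o then nb
       else if pvManhattan c o ≤ d then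
         if D.contains o then pvCanonUnion (PySem.Set.ofList cs) nb (D.getD o [])
         else pvCanonAdd (PySem.Set.ofList cs) nb o
       else nb) := by
  obtain ⟨ha, hb, hc, hd, he, hf⟩ := h
  have hoU : o ∈ PySem.Set.ofList cs := (PySem.Set.mem_ofList cs o).mpr ho
  have hlc : L'.get? c = some (L'.getD c 0) := pv_get?_of_contains L' c 0 ha
  have hnbc : ∀ y ∈ PySem.Set.ofList cs, nb.contains y = (L'.get? y == some (L'.getD c 0)) := by
    intro y hy
    rw [hb]
    show (List.filter _ _).contains y = _
    rw [pv_contains_filter hy, hlc]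
  by_cases hman : pvManhattanAlt c o ≤ d
  · by_cases hno : nb.contains o = true
    · -- o already in nearby: both sides unchanged
      have homem : o ∈ nb := by simpa using hno
      have hgo : L'.get? o = L'.get? c := (mem_pvClassOf.mp (hb ▸ homem)).2
      have hco : L'.contains o = true := pv_contains_of_get?_eq_some (hgo.trans hlc)
      have heq : (L'.getD o 0 != L'.getD c 0) = false := by
        have : L'.getD o 0 = L'.getD c 0 := by
          rw [PySem.Dict.getD_eq_get?_getD, PySem.Dict.getD_eq_get?_getD, hgo]
        simp [this]
      rw [if_pos hman, if_pos hno]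
      rw [hco]
      simp only [Bool.not_true, Bool.false_eq_true, if_false, heq]
      exact ⟨ha, hb, hc, hd, he, hf⟩
    · rw [if_pos hman, if_neg hno, if_pos (show pvManhattan c o ≤ d from hman)]
      have honb : o ∉ nb := by simpa using hno
      by_cases hLo : L'.contains o = true
      · -- o has a label, not in c's class: a real merge (A: set union, B: relabel)
        have hoord : o ∈ ord := by
          rcases (hd o).mp hLo with h1 | h1
          · exact h1
          · exact absurd h1 honb
        have hgo : L'.get? o = some (L'.getD o 0) := pv_get?_of_contains L' o 0 hLo
        have hlolc : L'.getD o 0 ≠ L'.getD c 0 := by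
          intro hct
          apply honb
          rw [hb, mem_pvClassOf]
          exact ⟨hoU, by rw [hgo, hlc, hct]⟩
        have hne : (L'.getD o 0 != L'.getD c 0) = true := by simpa using hlolc
        have hDo : D.get? o = some (pvClassOf (PySem.Set.ofList cs) L o) :=
          pv_get?_of_items hD hond hoord
        have hDco : D.contains o = true := (pv_contains_D hD).mpr hoord
        have hDg : D.getD o [] = pvClassOf (PySem.Set.ofList cs) L o := by
          rw [PySem.Dict.getD_eq_get?_getD, hDo]; rfl
        have hclo : pvClassOf (PySem.Set.ofList cs) L' o = pvClassOf (PySem.Set.ofList cs) L o :=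
          hc o ((hcontL o).mpr hoord) honb
        rw [hLo]
        simp only [Bool.not_true, Bool.false_eq_true, if_false, hne, if_true, hDco, hDg]
        have hget'' : ∀ y, (pvRelabel L' (L'.getD o 0) (L'.getD c 0)).get? y
            = (L'.get? y).map (fun v => if v == L'.getD o 0 then L'.getD c 0 else v) :=
          fun y => pvRelabel_get? L' _ _ y
        have hlcne : (L'.getD c 0 == L'.getD o 0) = false := by simpa using (Ne.symm hlolc)
        have hgc'' : (pvRelabel L' (L'.getD o 0) (L'.getD c 0)).get? c = some (L'.getD c 0) := by
          rw [hget'' c, hlc]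
          simp [hlcne]
        have hsc : ∀ y ∈ PySem.Set.ofList cs,
            (pvClassOf (PySem.Set.ofList cs) L o).contains y = (L'.get? y == some (L'.getD o 0)) := by
          intro y hy
          rw [← hclo]
          show (List.filter _ _).contains y = _
          rw [pv_contains_filter hy, hgo]
        refine ⟨by rw [pvRelabel_contains]; exact ha, ?_, ?_, ?_, ?_, ?_⟩
        · show List.filter (fun y => nb.contains y || (pvClassOf (PySem.Set.ofList cs) L o).contains y) (PySem.Set.ofList cs)
              = List.filter (fun y => (pvRelabel L' (L'.getD o 0) (L'.getD c 0)).get? y == (pvRelabel L' (L'.getD o 0) (L'.getD c 0)).get? c) (PySem.Set.ofList cs)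
          apply List.filter_congr
          intro y hy
          rw [hnbc y hy, hsc y hy, hgc'', hget'' y]
          cases hg : L'.get? y with
          | none => simp
          | some v =>
            simp only [Option.map_some]
            by_cases hv1 : v = L'.getD o 0
            · subst hv1; simp [hlolc]
            · have h1 : (v == L'.getD o 0) = false := by simpa using hv1
              simp [h1, Bool.or_comm]
        · intro x hLx hxnb
          have hxord : x ∈ ord := (hcontL x).mp hLx
          have hxU : x ∈ PySem.Set.ofList cs := (PySem.Set.mem_ofList cs x).mpr (hsub x hxord)
          have hgx : L'.get? x = some (L'.getD x 0) :=
            pv_get?_of_contains L' x 0 ((hd x).mpr (Or.inl hxord))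
          have hq : (nb.contains x || (pvClassOf (PySem.Set.ofList cs) L o).contains x) = false := by
            cases hq' : (nb.contains x || (pvClassOf (PySem.Set.ofList cs) L o).contains x)
            · rfl
            · exfalso
              apply hxnb
              show x ∈ List.filter _ _
              rw [List.mem_filter]
              exact ⟨hxU, hq'⟩
          rw [Bool.or_eq_false_iff] at hq
          have hxnbold : x ∉ nb := by
            intro hmem
            have hcx : nb.contains x = true := by simpa using hmem
            rw [hq.1] at hcx
            cases hcx
          have hxlc : (L'.getD x 0) ≠ (L'.getD c 0) := by
            have h1 := (hnbc x hxU).symm.trans hq.1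
            rw [hgx] at h1
            simpa using h1
          have hxlo : (L'.getD x 0) ≠ (L'.getD o 0) := by
            have h1 := (hsc x hxU).symm.trans hq.2
            rw [hgx] at h1
            simpa using h1
          have hgx'' : (pvRelabel L' (L'.getD o 0) (L'.getD c 0)).get? x = some (L'.getD x 0) := by
            rw [hget'' x, hgx]
            simp only [Option.map_some]
            rw [if_neg (by simp [hxlo] : ¬((L'.getD x 0 == L'.getD o 0) = true))]
          rw [← hc x hLx hxnbold]
          unfold pvClassOf
          apply List.filter_congr
          intro y hy
          rw [hgx'', hget'' y, hgx]
          cases hg : L'.get? y with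
          | none => simp
          | some v =>
            simp only [Option.map_some]
            by_cases hv1 : v = L'.getD o 0
            · subst hv1
              have e1 : (L'.getD c 0 == L'.getD x 0) = false := by simpa using (Ne.symm hxlc)
              have e2 : (L'.getD o 0 == L'.getD x 0) = false := by simpa using (Ne.symm hxlo)
              simp [e1, e2]
            · have h1 : (v == L'.getD o 0) = false := by simpa using hv1
              simp [h1]
        · intro x
          rw [pvRelabel_contains]
          constructor
          · intro hcx
            rcases (hd x).mp hcx with h1 | h1
            · exact Or.inl h1
            · refine Or.inr ?_
              show x ∈ List.filter _ _
              rw [List.mem_filter]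
              have hxU : x ∈ PySem.Set.ofList cs := (mem_pvClassOf.mp (hb ▸ h1)).1
              refine ⟨hxU, ?_⟩
              simp only [Bool.or_eq_true, List.contains_iff_mem]
              exact Or.inl h1
          · intro h1
            rcases h1 with h1 | h1
            · exact (hd x).mpr (Or.inl h1)
            · have h2 := (List.mem_filter.mp h1)
              rcases Bool.or_eq_true_iff.mp h2.2 with h3 | h3
              · exact (hd x).mpr (Or.inr (by simpa using h3))
              · have := (hsc x h2.1).symm.trans h3
                cases hg : L'.get? x with
                | none => rw [hg] at this; simp at this
                | some v => exact pv_contains_of_get?_eq_some hg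
        · intro v hv
          rw [pvRelabel_values] at hv
          rcases List.mem_map.mp hv with ⟨w, hw, hweq⟩
          by_cases hwl : (w == L'.getD o 0) = true
          · rw [← hweq]
            simp only [hwl, if_true]
            exact he _ (pv_get?_mem_values hlc)
          · rw [← hweq]
            simp only [hwl, Bool.false_eq_true, if_false]
            exact he _ hw
        · rw [pvRelabel_keys]; exact hf
      · -- o unlabelled: A adds o to nearby, B labels o with c's label
        have hLo' : L'.contains o = false := by simpa using hLo
        have hoord : o ∉ ord := fun h1 => hLo ((hd o).mpr (Or.inl h1))
        have hDco : D.contains o = false := by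
          cases hg : D.contains o
          · rfl
          · exact absurd ((pv_contains_D hD).mp hg) hoord
        have hco : c ≠ o := fun h1 => hLo (h1 ▸ ha)
        rw [hLo']
        simp only [Bool.not_false, if_true, hDco, Bool.false_eq_true, if_false]
        have hget'' : ∀ y, (L'.insert o (L'.getD c 0)).get? y
            = if y = o then some (L'.getD c 0) else L'.get? y :=
          fun y => PySem.Dict.get?_insert L' o y _
        have hgc'' : (L'.insert o (L'.getD c 0)).get? c = some (L'.getD c 0) := by
          rw [hget'' c, if_neg hco]
          exact hlc
        refine ⟨pv_contains_of_get?_eq_some hgc'', ?_, ?_, ?_, ?_, ?_⟩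
        · show pvCanonAdd _ _ _ = _
          unfold pvCanonAdd pvClassOf
          apply List.filter_congr
          intro y hy
          rw [hnbc y hy, hgc'', hget'' y]
          by_cases hyo : y = o
          · subst hyo
            simp
          · rw [if_neg hyo]
            simp [show ((y == o) = false) from by simpa using hyo]
        · intro x hLx hxnb
          have hxord : x ∈ ord := (hcontL x).mp hLx
          have hxU : x ∈ PySem.Set.ofList cs := (PySem.Set.mem_ofList cs x).mpr (hsub x hxord)
          have hgx : L'.get? x = some (L'.getD x 0) :=
            pv_get?_of_contains L' x 0 ((hd x).mpr (Or.inl hxord))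
          have hq : (nb.contains x || (x == o)) = false := by
            cases hq' : (nb.contains x || (x == o))
            · rfl
            · exfalso
              apply hxnb
              show x ∈ List.filter _ _
              rw [List.mem_filter]
              exact ⟨hxU, hq'⟩
          rw [Bool.or_eq_false_iff] at hq
          have hxo : x ≠ o := by simpa using hq.2
          have hxnbold : x ∉ nb := by
            intro hmem
            have : nb.contains x = true := by simpa using hmem
            rw [this] at hq
            simp at hq
          have hxlc : (L'.getD x 0) ≠ (L'.getD c 0) := by
            have h1 := (hnbc x hxU).symm.trans hq.1
            rw [hgx] at h1
            simpa using h1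
          have hgx'' : (L'.insert o (L'.getD c 0)).get? x = some (L'.getD x 0) := by
            rw [hget'' x, if_neg hxo]
            exact hgx
          rw [← hc x hLx hxnbold]
          unfold pvClassOf
          apply List.filter_congr
          intro y hy
          rw [hgx'', hget'' y, hgx]
          by_cases hyo : y = o
          · have hgo0 : L'.get? o = none := (PySem.Dict.get?_eq_none_iff_contains L' o).mpr hLo'
            rw [if_pos hyo, hyo, hgo0]
            have e1 : (L'.getD c 0 == L'.getD x 0) = false := by simpa using (Ne.symm hxlc)
            simp [e1]
          · rw [if_neg hyo]
        · intro x
          rw [PySem.Dict.contains_insert]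
          constructor
          · intro hcx
            rcases Bool.or_eq_true_iff.mp hcx with h1 | h1
            · refine Or.inr ?_
              show x ∈ List.filter _ _
              rw [List.mem_filter]
              have hxo : x = o := by simpa using h1
              subst hxo
              simp [hoU]
            · rcases (hd x).mp h1 with h2 | h2
              · exact Or.inl h2
              · refine Or.inr ?_
                show x ∈ List.filter _ _
                rw [List.mem_filter]
                have hxU : x ∈ PySem.Set.ofList cs := (mem_pvClassOf.mp (hb ▸ h2)).1
                refine ⟨hxU, ?_⟩
                simp only [Bool.or_eq_true, List.contains_iff_mem]
                exact Or.inl h2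
          · intro h1
            rcases h1 with h1 | h1
            · have := (hd x).mpr (Or.inl h1)
              simp [this]
            · have h2 := List.mem_filter.mp h1
              rcases Bool.or_eq_true_iff.mp h2.2 with h3 | h3
              · have := (hd x).mpr (Or.inr (by simpa using h3))
                simp [this]
              · simp [h3]
        · intro v hv
          rcases PySem.Dict.mem_values_insert L' o _ v hv with h1 | h1
          · rw [h1]
            exact he _ (pv_get?_mem_values hlc)
          · exact he _ h1
        · exact PySem.Dict.nodup_keys_insert L' o _ hf
  · rw [if_neg hman]
    by_cases hno : nb.contains o = true
    · rw [if_pos hno]; exact ⟨ha, hb, hc, hd, he, hf⟩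
    · rw [if_neg hno, if_neg (show ¬pvManhattan c o ≤ d from hman)]; exact ⟨ha, hb, hc, hd, he, hf⟩

-- the two inner loops, run over the same `others` list, preserve the joint invariant
theorem pvInnerFold (cs : List (List Int)) (d : Int) (L : PySem.Dict (List Int) Int)
    (D : PySem.Dict (List Int) (List (List Int))) (ord : List (List Int)) (c : List Int)
    (i : Int)
    (hcontL : ∀ x, L.contains x = true ↔ x ∈ ord)
    (hD : D.items = ord.map (fun x => (x, pvClassOf (PySem.Set.ofList cs) L x)))
    (hond : ord.Nodup)
    (hsub : ∀ x ∈ ord, x ∈ cs) :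
    ∀ (os : List (List Int)), (∀ x ∈ os, x ∈ cs) →
    ∀ (L' : PySem.Dict (List Int) Int) (nb : List (List Int)), pvInner cs L i ord c L' nb →
    pvInner cs L i ord c
      (os.foldl (fun lbl other =>
        if pvManhattanAlt c other ≤ d then
          if !lbl.contains other then lbl.insert other (lbl.getD c 0)
          else if lbl.getD other 0 != lbl.getD c 0 then
            pvRelabel lbl (lbl.getD other 0) (lbl.getD c 0)
          else lbl
        else lbl) L')
      (os.foldl (fun nb other =>
        if nb.contains other then nb
        else if pvManhattan c other ≤ d then
          if D.contains other then
            pvCanonUnion (PySem.Set.ofList cs) nb (D.getD other [])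
          else pvCanonAdd (PySem.Set.ofList cs) nb other
        else nb) nb) := by
  intro os
  induction os with
  | nil => intro _ L' nb h; exact h
  | cons o t ih =>
    intro hos L' nb h
    rw [List.foldl_cons, List.foldl_cons]
    exact ih (fun x hx => hos x (List.mem_cons_of_mem o hx)) _ _
      (pvInnerStep cs d L D ord c i hcontL hD hond hsub o (hos o List.mem_cons_self) L' nb h)

-- B's inner loop appends exactly the fresh coordinates within range, first occurrences in scan order
theorem pvInnerKeys (c : List Int) (d : Int) :
    ∀ (os : List (List Int)) (L0 : PySem.Dict (List Int) Int),
    (os.foldl (fun lbl other =>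
      if pvManhattanAlt c other ≤ d then
        if !lbl.contains other then lbl.insert other (lbl.getD c 0)
        else if lbl.getD other 0 != lbl.getD c 0 then
          pvRelabel lbl (lbl.getD other 0) (lbl.getD c 0)
        else lbl
      else lbl) L0).keys
    = L0.keys ++ (PySem.Set.ofList (os.filter (fun o => decide (pvManhattanAlt c o ≤ d)))).filter
        (fun o => !L0.contains o) := by
  intro os
  induction os with
  | nil => intro L0; simp
  | cons o t ih =>
    intro L0
    rw [List.foldl_cons, List.filter_cons]
    by_cases hman : pvManhattanAlt c o ≤ d
    · simp only [hman, decide_true, if_true]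
      rw [PySem.Set.ofList_cons]
      by_cases hLo : L0.contains o = true
      · rw [hLo]
        simp only [Bool.not_true, Bool.false_eq_true, if_false]
        by_cases hne : (L0.getD o 0 != L0.getD c 0) = true
        · rw [if_pos hne, ih]
          rw [pvRelabel_keys]
          congr 1
          have hcont : ∀ x, (pvRelabel L0 (L0.getD o 0) (L0.getD c 0)).contains x = L0.contains x :=
            pvRelabel_contains L0 _ _
          rw [List.filter_cons]
          have : (!(pvRelabel L0 (L0.getD o 0) (L0.getD c 0)).contains o) = false := by
            rw [hcont o, hLo]; rfl
          rw [List.filter_congr (fun x _ => by rw [hcont x])]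
          have hq : (!L0.contains o) = false := by rw [hLo]; rfl
          rw [hq]
          simp only [Bool.false_eq_true, if_false]
          rw [pv_filter_discard hq]
        · rw [if_neg hne, ih]
          congr 1
          rw [List.filter_cons]
          have hq : (!L0.contains o) = false := by rw [hLo]; rfl
          rw [hq]
          simp only [Bool.false_eq_true, if_false]
          rw [pv_filter_discard hq]
      · have hLo' : L0.contains o = false := by simpa using hLo
        rw [hLo']
        simp only [Bool.not_false, if_true]
        rw [ih]
        rw [PySem.Dict.keys_insert_of_not_contains L0 (L0.getD c 0) hLo']
        rw [List.filter_cons]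
        have hq : (!L0.contains o) = true := by rw [hLo']; rfl
        rw [hq]
        simp only [if_true, List.append_assoc, List.cons_append, List.nil_append]
        congr 2
        have h1 : ((PySem.Set.ofList (t.filter (fun o => decide (pvManhattanAlt c o ≤ d)))).discard o).filter
              (fun x => !L0.contains x)
            = ((PySem.Set.ofList (t.filter (fun o => decide (pvManhattanAlt c o ≤ d)))).discard o).filter
              (fun x => !(L0.insert o (L0.getD c 0)).contains x) := by
          apply List.filter_congr
          intro x hx
          have hxo : x ≠ o := (PySem.Set.mem_discard _ _ _ |>.mp hx).2
          rw [PySem.Dict.contains_insert]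
          have : (x == o) = false := by simpa using hxo
          rw [this]
          simp
        rw [h1]
        have hq2 : (!(L0.insert o (L0.getD c 0)).contains o) = false := by
          rw [PySem.Dict.contains_insert_self]; rfl
        rw [pv_filter_discard hq2]
    · simp only [hman, decide_false, if_false, Bool.false_eq_true]
      exact ih L0

-- the single-position step preserves the invariant
theorem pvStep (cs : List (List Int)) (d : Int) (pre t : List (List Int)) (c : List Int)
    (hcs : cs = pre ++ c :: t)
    (D : PySem.Dict (List Int) (List (List Int))) (L : PySem.Dict (List Int) Int)
    (hInv : pvInv cs D L pre) :
    pvInv cs (pvAStep cs d (PySem.Set.ofList cs) D ((pre.length : Int), c))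
      (pvBStep cs d L ((pre.length : Int), c)) (pre ++ [c]) := by
  obtain ⟨hD, hval, hknd, hsubK, hpre⟩ := hInv
  set i := (pre.length : Int) with hi
  have hcontL : ∀ x, L.contains x = true ↔ x ∈ L.keys :=
    fun x => PySem.Dict.contains_iff_mem_keys L x
  have hbool : ∀ x, L.keys.contains x = L.contains x := by
    intro x
    cases hLx : L.contains x
    · have : x ∉ L.keys := fun h => by rw [(hcontL x).mpr h] at hLx; cases hLx
      simpa using this
    · have : x ∈ L.keys := (hcontL x).mp hLx
      simpa using this
  have hccs : c ∈ cs := by rw [hcs]; simp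
  have hcU : c ∈ PySem.Set.ofList cs := (PySem.Set.mem_ofList cs c).mpr hccs
  have htcs : ∀ x ∈ t, x ∈ cs := by
    intro x hx
    rw [hcs]
    simp [hx]
  have hslice : PySem.List.slice cs (some (i + 1)) none = t := by
    have h1 : i + 1 = (((pre.length + 1 : Nat)) : Int) := by push_cast; ring
    rw [h1, PySem.List.slice_from_natCast, hcs,
      show pre ++ c :: t = (pre ++ [c]) ++ t by simp,
      show pre.length + 1 = (pre ++ [c]).length by simp, List.drop_left]
  simp only [pvAStep, pvBStep]
  rw [hslice]
  set nb0 := (if !D.contains c then pvCanonSingleton (PySem.Set.ofList cs) c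
    else D.getD c []) with hnb0
  set L0 := (if L.contains c then L else L.insert c i) with hL0
  set nb1 := t.foldl (fun nb other =>
    if nb.contains other then nb
    else if pvManhattan c other ≤ d then
      if D.contains other then
        pvCanonUnion (PySem.Set.ofList cs) nb (D.getD other [])
      else pvCanonAdd (PySem.Set.ofList cs) nb other
    else nb) nb0 with hnb1
  set L1 := t.foldl (fun lbl other =>
    if pvManhattanAlt c other ≤ d then
      if !lbl.contains other then lbl.insert other (lbl.getD c 0)
      else if lbl.getD other 0 != lbl.getD c 0 then
        pvRelabel lbl (lbl.getD other 0) (lbl.getD c 0)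
      else lbl
    else lbl) L0 with hL1
  -- phase 0 : B initialises c's label, A reads c's current constellation
  have hbase : pvInner cs L i L.keys c L0 nb0 := by
    rw [hL0, hnb0]
    by_cases hLc : L.contains c = true
    · have hcord : c ∈ L.keys := (hcontL c).mp hLc
      have hDc : D.contains c = true := (pv_contains_D hD).mpr hcord
      have hDg : D.getD c [] = pvClassOf (PySem.Set.ofList cs) L c := by
        rw [PySem.Dict.getD_eq_get?_getD, pv_get?_of_items hD hknd hcord]; rfl
      rw [if_pos hLc, hDc]
      simp only [Bool.not_true, Bool.false_eq_true, if_false, hDg]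
      refine ⟨hLc, rfl, fun x _ _ => rfl, ?_, fun v hv => le_of_lt (hval v hv), hknd⟩
      intro x
      constructor
      · intro hx; exact Or.inl ((hcontL x).mp hx)
      · intro hx
        rcases hx with hx | hx
        · exact (hcontL x).mpr hx
        · exact pv_contains_of_get?_eq_some
            (((mem_pvClassOf).mp hx).2.trans (pv_get?_of_contains L c 0 hLc))
    · have hLc' : L.contains c = false := by simpa using hLc
      have hcord : c ∉ L.keys := fun h1 => hLc ((hcontL c).mpr h1)
      have hDc : D.contains c = false := by
        cases hg : D.contains c
        · rfl
        · exact absurd ((pv_contains_D hD).mp hg) hcord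
      rw [if_neg hLc, hDc]
      simp only [Bool.not_false, if_true]
      have hfresh : ∀ y, L.get? y ≠ some i := by
        intro y hy
        exact absurd rfl (ne_of_lt (hval i (pv_get?_mem_values hy)))
      have hget0 : ∀ y, (L.insert c i).get? y = if y = c then some i else L.get? y :=
        fun y => PySem.Dict.get?_insert L c y i
      have hgc0 : (L.insert c i).get? c = some i := by rw [hget0 c, if_pos rfl]
      refine ⟨PySem.Dict.contains_insert_self L c i, ?_, ?_, ?_, ?_,
        PySem.Dict.nodup_keys_insert L c i hknd⟩
      · unfold pvCanonSingleton pvClassOf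
        apply List.filter_congr
        intro y hy
        rw [hgc0, hget0 y]
        by_cases hyc : y = c
        · subst hyc; simp
        · rw [if_neg hyc]
          have h1 : (y == c) = false := by simpa using hyc
          have h2 : (L.get? y == some i) = false := by
            cases hg : L.get? y with
            | none => rfl
            | some v =>
              have : v ≠ i := fun h3 => hfresh y (h3 ▸ hg)
              simpa using this
          rw [h1, h2]
      · intro x hLx hxnb
        have hxc : x ≠ c := fun h1 => hLc (h1 ▸ hLx)
        have hgx : L.get? x = some (L.getD x 0) := pv_get?_of_contains L x 0 hLx
        have hgx0 : (L.insert c i).get? x = some (L.getD x 0) := by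
          rw [hget0 x, if_neg hxc]; exact hgx
        unfold pvClassOf
        apply List.filter_congr
        intro y hy
        rw [hgx0, hgx, hget0 y]
        by_cases hyc : y = c
        · rw [if_pos hyc, hyc, (PySem.Dict.get?_eq_none_iff_contains L c).mpr hLc']
          have : (i == L.getD x 0) = false := by
            have := hfresh x
            rw [hgx] at this
            simpa using fun h1 => this (by rw [h1])
          simp [this]
        · rw [if_neg hyc]
      · intro x
        rw [PySem.Dict.contains_insert]
        constructor
        · intro hx
          rcases Bool.or_eq_true_iff.mp hx with h1 | h1
          · refine Or.inr ?_
            have : x = c := by simpa using h1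
            subst this
            show x ∈ List.filter _ _
            simp [hcU]
          · exact Or.inl ((hcontL x).mp h1)
        · intro hx
          rcases hx with h1 | h1
          · have := (hcontL x).mpr h1
            simp [this]
          · have h2 := List.mem_filter.mp h1
            have : x = c := by simpa using h2.2
            simp [this]
      · intro v hv
        rcases PySem.Dict.mem_values_insert L c i v hv with h1 | h1
        · exact h1.le
        · exact le_of_lt (hval v h1)
  -- the two inner loops run over the same list t
  have hI := pvInnerFold cs d L D L.keys c i hcontL hD hknd hsubK t htcs L0 nb0 hbase
  rw [← hnb1, ← hL1] at hI
  obtain ⟨h1a, h1b, h1c, h1d, h1e, h1f⟩ := hI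
  -- key order of B's inner loop
  set newlist := (PySem.Set.ofList (t.filter (fun o => decide (pvManhattanAlt c o ≤ d)))).filter
      (fun o => !L0.contains o) with hnewlist
  have hkeys1 : L1.keys = L0.keys ++ newlist := by
    rw [hL1, hnewlist]
    exact pvInnerKeys c d t L0
  set cpart := (if L.contains c then ([] : List (List Int)) else [c]) with hcpart
  have hL0keys : L0.keys = L.keys ++ cpart := by
    rw [hL0, hcpart]
    by_cases hLc : L.contains c = true
    · rw [if_pos hLc, if_pos hLc]; simp
    · have hLc' : L.contains c = false := by simpa using hLc
      rw [if_neg hLc, if_neg hLc]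
      exact PySem.Dict.keys_insert_of_not_contains L i hLc'
  have hL0c : L0.contains c = true := by
    rw [hL0]
    by_cases hLc : L.contains c = true
    · rw [if_pos hLc]; exact hLc
    · rw [if_neg hLc]; exact PySem.Dict.contains_insert_self L c i
  have hL0y : ∀ y, y ≠ c → L0.contains y = L.contains y := by
    intro y hyc
    rw [hL0]
    by_cases hLc : L.contains c = true
    · rw [if_pos hLc]
    · rw [if_neg hLc, PySem.Dict.contains_insert]
      have : (y == c) = false := by simpa using hyc
      rw [this]
      simp
  have hgc : L1.get? c = some (L1.getD c 0) := pv_get?_of_contains L1 c 0 h1a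
  have hmemnb : ∀ x, x ∈ nb1 ↔ x ∈ PySem.Set.ofList cs ∧ L1.get? x = L1.get? c := by
    intro x
    rw [h1b]
    exact mem_pvClassOf
  have hnd1 : nb1.Nodup := by
    rw [h1b]
    exact (PySem.Set.nodup_ofList cs).filter _
  have hDcont : ∀ n, D.contains n = L.keys.contains n := by
    intro n
    rw [hbool n]
    cases hLn : L.contains n
    · cases hg : D.contains n
      · rfl
      · exact absurd ((hcontL n).mpr ((pv_contains_D hD).mp hg)) (by rw [hLn]; simp)
    · exact (pv_contains_D hD).mpr ((hcontL n).mp hLn)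
  have hnewf : nb1.filter (fun n => !D.contains n)
      = (PySem.Set.ofList cs).filter
          (fun y => (L1.get? y == some (L1.getD c 0)) && !L.keys.contains y) := by
    rw [h1b]
    unfold pvClassOf
    rw [List.filter_filter]
    apply List.filter_congr
    intro y _
    rw [hgc, hDcont y, Bool.and_comm]
  -- the star equality: A's fresh block = B's fresh keys (c first, then the scanned new ones)
  have hstar : nb1.filter (fun n => !D.contains n) = cpart ++ newlist := by
    rw [hnewf]
    have hq_pre : ∀ x ∈ pre,
        ((L1.get? x == some (L1.getD c 0)) && !L.keys.contains x) = false := by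
      intro x hx
      have h1 : x ∈ L.keys := hpre x hx
      have h2 : L.keys.contains x = true := by simpa using h1
      rw [h2]
      simp
    have htail : (PySem.Set.discard (PySem.Set.ofList t) c).filter
          (fun y => (L1.get? y == some (L1.getD c 0)) && !L.keys.contains y) = newlist := by
      rw [hnewlist, pv_ofList_filter, List.filter_filter]
      have hrc : ((!L0.contains c) && decide (pvManhattanAlt c c ≤ d)) = false := by
        rw [hL0c]
        simp
      rw [← pv_filter_discard (q := fun o => !L0.contains o && decide (pvManhattanAlt c o ≤ d))
        (S := PySem.Set.ofList t) (x := c) hrc]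
      apply List.filter_congr
      intro y hy
      have hyd := PySem.Set.mem_discard (PySem.Set.ofList t) c y |>.mp hy
      have hyt : y ∈ t := (PySem.Set.mem_ofList t y).mp hyd.1
      have hyc : y ≠ c := hyd.2
      have hL0yy : L0.contains y = L.contains y := hL0y y hyc
      cases hLy : L.contains y
      · -- y fresh w.r.t. L : class membership coincides with being within range
        rw [hbool y, hL0yy, hLy]
        simp only [Bool.not_false, Bool.and_true, Bool.true_and]
        by_cases hnear : pvManhattanAlt c y ≤ d
        · have hynl : y ∈ newlist := by
            rw [hnewlist]
            rw [List.mem_filter]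
            constructor
            · rw [PySem.Set.mem_ofList, List.mem_filter]
              exact ⟨hyt, by simpa using hnear⟩
            · rw [hL0yy, hLy]
              rfl
          have hyk : y ∈ L1.keys := by
            rw [hkeys1]
            exact List.mem_append_right _ hynl
          have hyc1 : L1.contains y = true := (PySem.Dict.contains_iff_mem_keys L1 y).mpr hyk
          rcases (h1d y).mp hyc1 with h2 | h2
          · exact absurd ((hcontL y).mpr h2) (by rw [hLy]; simp)
          · have h3 := ((hmemnb y).mp h2).2
            rw [h3, hgc]
            simp [hnear]
        · have h2 : L1.get? y ≠ some (L1.getD c 0) := by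
            intro h3
            have hyc1 : L1.contains y = true := pv_contains_of_get?_eq_some h3
            have hyk : y ∈ L1.keys := (PySem.Dict.contains_iff_mem_keys L1 y).mp hyc1
            rw [hkeys1] at hyk
            rcases List.mem_append.mp hyk with h4 | h4
            · rw [hL0keys] at h4
              rcases List.mem_append.mp h4 with h5 | h5
              · exact absurd ((hcontL y).mpr h5) (by rw [hLy]; simp)
              · rw [hcpart] at h5
                have : y = c := by
                  by_cases hLcc : L.contains c = true
                  · rw [if_pos hLcc] at h5; cases h5
                  · rw [if_neg hLcc] at h5; simpa using h5
                exact hyc this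
            · rw [hnewlist] at h4
              have h5 := (List.mem_filter.mp h4).1
              rw [PySem.Set.mem_ofList, List.mem_filter] at h5
              exact hnear (by simpa using h5.2)
          have h4 : (L1.get? y == some (L1.getD c 0)) = false := by simpa using h2
          rw [h4]
          simp [hnear]
      · -- y already labelled : excluded on both sides
        rw [hbool y, hL0yy, hLy]
        simp
    rw [hcs, pv_ofList_append_filter _ pre (c :: t) hq_pre, PySem.Set.ofList_cons,
      List.filter_cons]
    have hqc : ((L1.get? c == some (L1.getD c 0)) && !L.keys.contains c) = !L.contains c := by
      rw [hgc, hbool c]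
      simp
    rw [hqc, hcpart]
    by_cases hLc : L.contains c = true
    · rw [hLc]
      simpa using htail
    · have hLc' : L.contains c = false := by simpa using hLc
      rw [hLc']
      simpa using htail
  -- assemble the invariant for pre ++ [c]
  have hmemcn : ∀ x ∈ cpart ++ newlist, pvClassOf (PySem.Set.ofList cs) L1 x = nb1 := by
    intro x hx
    rcases List.mem_append.mp hx with h1 | h1
    · have : x = c := by
        rw [hcpart] at h1
        by_cases hLcc : L.contains c = true
        · rw [if_pos hLcc] at h1; cases h1
        · rw [if_neg hLcc] at h1; simpa using h1
      rw [this, ← h1b]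
    · have hxk : x ∈ L1.keys := by
        rw [hkeys1]
        exact List.mem_append_right _ h1
      have hxc1 : L1.contains x = true := (PySem.Dict.contains_iff_mem_keys L1 x).mpr hxk
      have hxL : L.contains x = false := by
        have h2 := (List.mem_filter.mp (hnewlist ▸ h1)).2
        have h3 : L0.contains x = false := by simpa using h2
        cases hLx : L.contains x
        · rfl
        · exfalso
          have h4 : x ∈ L.keys := (hcontL x).mp hLx
          have h5 : x ∈ L0.keys := by
            rw [hL0keys]; exact List.mem_append_left _ h4
          have := (PySem.Dict.contains_iff_mem_keys L0 x).mpr h5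
          rw [h3] at this
          cases this
      rcases (h1d x).mp hxc1 with h2 | h2
      · exact absurd ((hcontL x).mpr h2) (by rw [hxL]; simp)
      · have h3 := ((hmemnb x).mp h2).2
        rw [h1b]
        exact pv_classOf_eq_of_same h3
  refine ⟨?_, ?_, ?_, ?_, ?_⟩
  · -- the dictionary after A's reassignment loop
    rw [pv_items_foldl_insert_const nb1 nb1 D hnd1, hD, hstar, hkeys1, hL0keys,
      List.append_assoc]
    simp only [List.map_append, List.map_map]
    congr 1
    · apply List.map_congr_left
      intro x hx
      simp only [Function.comp]
      by_cases hxnb : nb1.contains x = true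
      · rw [if_pos hxnb]
        have hx1 : x ∈ nb1 := by simpa using hxnb
        have : pvClassOf (PySem.Set.ofList cs) L1 x = nb1 :=
          (pv_classOf_eq_of_same ((hmemnb x).mp hx1).2).trans h1b.symm
        rw [this]
      · rw [if_neg hxnb]
        have hx1 : x ∉ nb1 := by simpa using hxnb
        rw [h1c x ((hcontL x).mpr hx) hx1]
    · congr 1
      · exact List.map_congr_left (fun x hx => by rw [hmemcn x (List.mem_append_left _ hx)])
      · exact List.map_congr_left (fun x hx => by rw [hmemcn x (List.mem_append_right _ hx)])
  · -- label values stay below the next index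
    intro v hv
    have h1 := h1e v hv
    have h2 : ((pre ++ [c]).length : Int) = i + 1 := by
      rw [hi]; simp
    rw [h2]
    omega
  · exact h1f
  · -- keys lie in coords
    intro x hx
    rw [hkeys1, hL0keys] at hx
    rcases List.mem_append.mp hx with h1 | h1
    · rcases List.mem_append.mp h1 with h2 | h2
      · exact hsubK x h2
      · have : x = c := by
          rw [hcpart] at h2
          by_cases hLcc : L.contains c = true
          · rw [if_pos hLcc] at h2; cases h2
          · rw [if_neg hLcc] at h2; simpa using h2
        rw [this]; exact hccs
    · have h2 := (List.mem_filter.mp (hnewlist ▸ h1)).1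
      rw [PySem.Set.mem_ofList, List.mem_filter] at h2
      exact htcs x h2.1
  · -- the processed prefix is covered
    intro x hx
    rcases List.mem_append.mp hx with h1 | h1
    · rw [hkeys1, hL0keys]
      exact List.mem_append_left _ (List.mem_append_left _ (hpre x h1))
    · have : x = c := by simpa using h1
      rw [this]
      exact (PySem.Dict.contains_iff_mem_keys L1 c).mp h1a

-- the whole pass, by induction over the remaining positions
theorem pvLoop (cs : List (List Int)) (d : Int) :
    ∀ (rest pre : List (List Int)) (D : PySem.Dict (List Int) (List (List Int)))
      (L : PySem.Dict (List Int) Int),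
    cs = pre ++ rest → pvInv cs D L pre →
    pvInv cs ((PySem.List.enumerate rest (pre.length : Int)).foldl (pvAStep cs d (PySem.Set.ofList cs)) D)
      ((PySem.List.enumerate rest (pre.length : Int)).foldl (pvBStep cs d) L)
      (pre ++ rest) := by
  intro rest
  induction rest with
  | nil =>
    intro pre D L hcs hInv
    simpa using hInv
  | cons c t ih =>
    intro pre D L hcs hInv
    have henum : PySem.List.enumerate (c :: t) (pre.length : Int)
        = ((pre.length : Int), c) :: PySem.List.enumerate t ((pre.length : Int) + 1) := rfl
    rw [henum, List.foldl_cons, List.foldl_cons]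
    have hlen : ((pre.length : Int) + 1) = (((pre ++ [c]).length : Nat) : Int) := by
      simp
    have hstep := pvStep cs d pre t c hcs D L hInv
    have hcs' : cs = (pre ++ [c]) ++ t := by simpa using hcs
    have := ih (pre ++ [c]) _ _ hcs' hstep
    rw [hlen]
    simpa using this

theorem pvMain (cs : List (List Int)) (d : Int) :
    form_constellations cs d = form_constellations_alt cs d := by
  have hbase : pvInv cs PySem.Dict.empty PySem.Dict.empty [] := by
    refine ⟨rfl, ?_, ?_, ?_, ?_⟩
    · intro v hv
      simp [PySem.Dict.empty, PySem.Dict.values] at hv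
    · simp [PySem.Dict.empty, PySem.Dict.keys]
    · intro x hx
      simp [PySem.Dict.empty, PySem.Dict.keys] at hx
    · intro x hx
      cases hx
  have hL := pvLoop cs d cs [] PySem.Dict.empty PySem.Dict.empty (by simp) hbase
  obtain ⟨hDit, -, hknd, hsub, hcov⟩ := hL
  simp only [List.nil_append, List.length_nil, Nat.cast_zero] at hDit hknd hsub hcov
  show ((PySem.List.enumerate cs 0).foldl (pvAStep cs d (PySem.Set.ofList cs)) PySem.Dict.empty).items = _
  rw [hDit]
  show _ = (((PySem.List.enumerate cs 0).foldl (pvBStep cs d) PySem.Dict.empty).keys).map _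
  apply List.map_congr_left
  intro c hc
  set L := (PySem.List.enumerate cs 0).foldl (pvBStep cs d) PySem.Dict.empty with hLdef
  have hLc : L.contains c = true := (PySem.Dict.contains_iff_mem_keys L c).mpr hc
  have hgc := pv_get?_of_contains L c 0 hLc
  congr 1
  rw [pv_ofList_filter]
  unfold pvClassOf
  apply List.filter_congr
  intro y hy
  have hycs : y ∈ cs := (PySem.Set.mem_ofList cs y).mp hy
  have hLy : L.contains y = true := (PySem.Dict.contains_iff_mem_keys L y).mpr (hcov y hycs)
  have hgy := pv_get?_of_contains L y 0 hLy
  rw [hgy, hgc]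
  rfl

-- ===== VERDICT (by name: the statement is the Claim_ definition above) =====
theorem form_constellations_spec : Claim_equal_form_constellations := by
  intro coords dist _
  unfold Spec_form_constellations
  exact pvMain coords dist
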